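-- pv_equiv track=rewrite | github.com/CleanYANG/Hide-Seek-cemiR | hide_seek_cemir.py | extract_unpaired_regions
-- ===== SOURCE A (Python) =====
-- def extract_unpaired_regions(dotbracket):
--     """
--     从 dot-bracket 字符串中抽取所有连续的 '.' 区间。
--     返回:
--       ranges: list[(start, end)]，1-based 闭区间
--     """
--     ranges = []
--     in_region = False
--     start = None
--
--     for i, ch in enumerate(dotbracket, start=1):  # 1-based
--         if ch == ".":
--             if not in_region:
--                 in_region = True
--                 start = i
--         else:
--             if in_region:
--                 ranges.append((start, i - 1))
--                 in_region = False
--                 start = None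
--
--     if in_region and start is not None:
--         ranges.append((start, len(dotbracket)))
--
--     return ranges
-- ===== SOURCE B (Python) =====
-- import re
--
-- def extract_unpaired_regions(dotbracket):
--     return [(m.start() + 1, m.end()) for m in re.finditer(r"\.+", dotbracket)]
-- ===== Notes on version B (the rewrite author's own statement) =====
-- stated objective: idiomatic
-- what changed: Replaces the explicit in_region/start state machine (with its trailing-flush branch) by re.finditer(r'\.+'), mapping each maximal dot run to (start+1, end).
import Mathlib
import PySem

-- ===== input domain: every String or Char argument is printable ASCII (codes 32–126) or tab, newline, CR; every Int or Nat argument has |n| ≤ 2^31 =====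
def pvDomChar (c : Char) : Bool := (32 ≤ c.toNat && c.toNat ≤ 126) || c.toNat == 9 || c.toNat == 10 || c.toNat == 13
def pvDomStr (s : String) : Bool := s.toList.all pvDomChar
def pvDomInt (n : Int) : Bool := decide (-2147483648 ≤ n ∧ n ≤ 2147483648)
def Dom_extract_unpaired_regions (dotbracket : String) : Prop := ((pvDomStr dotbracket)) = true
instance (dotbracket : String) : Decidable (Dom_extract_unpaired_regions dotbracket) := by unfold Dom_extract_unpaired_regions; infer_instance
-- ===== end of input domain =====

-- B replaces A's in_region/start state machine (and trailing flush) by locating each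
-- maximal run of dots directly (re.finditer(r'\.+') in Python); idiomatic, same O(n) cost.

-- ===== PORT A =====
-- A's for-loop over enumerate(dotbracket, start=1), carrying (ranges, in_region, start).
def aLoop : List Char → Int → List (Int × Int) → Bool → Option Int →
    (List (Int × Int) × Bool × Option Int)
  | [], _, ranges, in_region, start => (ranges, in_region, start)
  | ch :: rest, i, ranges, in_region, start =>
    if ch = '.' then
      if !in_region then aLoop rest (i + 1) ranges true (some i)
      else aLoop rest (i + 1) ranges in_region start
    else
      if in_region then aLoop rest (i + 1) (ranges ++ [(start.getD 0, i - 1)]) false none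
      else aLoop rest (i + 1) ranges in_region start

def extract_unpaired_regions (dotbracket : String) : List (Int × Int) :=
  let st := aLoop dotbracket.toList 1 [] false none
  if st.2.1 = true ∧ st.2.2 ≠ none then
    st.1 ++ [(st.2.2.getD 0, (dotbracket.toList.length : Int))]
  else st.1

-- ===== PORT B =====
-- finditer(r'\.+'): skip to the next '.', take the whole maximal run, emit (i+1, i+len(run)).
def altGo : List Char → Nat → List (Int × Int)
  | [], _ => []
  | c :: rest, i =>
    if c = '.' then
      let k := (rest.takeWhile (· = '.')).length
      ((i : Int) + 1, (i : Int) + 1 + k) :: altGo (rest.dropWhile (· = '.')) (i + 1 + k)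
    else altGo rest (i + 1)
termination_by l _ => l.length
decreasing_by
  · exact Nat.lt_succ_of_le (rest.length_dropWhile_le _)
  · simp

def extract_unpaired_regions_alt (dotbracket : String) : List (Int × Int) :=
  altGo dotbracket.toList 0

-- ===== PRECONDITION & SPEC =====
def Spec_extract_unpaired_regions (dotbracket : String) (out : List (Int × Int)) : Prop := out = extract_unpaired_regions_alt dotbracket
instance (dotbracket : String) (out : List (Int × Int)) : Decidable (Spec_extract_unpaired_regions dotbracket out) := by unfold Spec_extract_unpaired_regions; infer_instance

-- ===== CLAIM (what is proved, stated in full; the proofs are below) =====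
def Claim_equal_extract_unpaired_regions : Prop := ∀ (dotbracket : String), Dom_extract_unpaired_regions dotbracket → Spec_extract_unpaired_regions dotbracket (extract_unpaired_regions dotbracket)

-- ===== LEMMAS AND PROOFS =====

-- flush: apply A's trailing "if in_region and start is not None" to a loop state,
-- with `total` = len(dotbracket).
def aFlush (total : Int) (st : List (Int × Int) × Bool × Option Int) : List (Int × Int) :=
  if st.2.1 = true ∧ st.2.2 ≠ none then st.1 ++ [(st.2.2.getD 0, total)] else st.1

-- Inside a run: A walks the remaining dots one by one, then closes the interval.
theorem aLoop_in_region (l : List Char) :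
    ∀ (m : Nat) (ranges : List (Int × Int)) (s : Int),
      aLoop l ((m : Int) + 1) ranges true (some s) =
        (if l.dropWhile (· = '.') = [] then (ranges, true, some s)
         else aLoop (l.dropWhile (· = '.'))
                ((m : Int) + (l.takeWhile (· = '.')).length + 1)
                (ranges ++ [(s, (m : Int) + (l.takeWhile (· = '.')).length)]) false none) := by
  induction l with
  | nil => intro m ranges s; simp [aLoop]
  | cons c rest ih =>
    intro m ranges s
    by_cases hc : c = '.'
    · subst hc
      have h1 : ((m : Int) + 1) + 1 = ((m + 1 : Nat) : Int) + 1 := by push_cast; ring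
      rw [show aLoop ('.' :: rest) ((m : Int) + 1) ranges true (some s)
            = aLoop rest (((m : Int) + 1) + 1) ranges true (some s) from by simp [aLoop]]
      rw [h1, ih (m + 1) ranges s]
      simp only [List.dropWhile_cons, List.takeWhile_cons, decide_true, if_true,
        List.length_cons]
      by_cases hd : rest.dropWhile (· = '.') = []
      · simp [hd]
      · simp only [hd, if_false]
        have e1 : ((m + 1 : Nat) : Int) + ((rest.takeWhile (· = '.')).length : Int)
            = (m : Int) + (((rest.takeWhile (· = '.')).length + 1 : Nat) : Int) := by
          push_cast; ring
        rw [e1]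
    · have e1 : (m : Int) + 1 - 1 = (m : Int) := by ring
      simp [aLoop, hc, e1]

-- Main invariant: from the not-in-region state at 1-based index m+1, A's flushed result
-- is the accumulated ranges followed by B's scan from 0-based position m.
theorem aLoop_out_region (l : List Char) (m : Nat) (ranges : List (Int × Int)) :
      aFlush ((m : Int) + l.length) (aLoop l ((m : Int) + 1) ranges false none) =
        ranges ++ altGo l m := by
    match l with
    | [] => simp [aLoop, altGo, aFlush]
    | c :: rest =>
      by_cases hc : c = '.'
      · subst hc
        have h1 : ((m : Int) + 1) + 1 = ((m + 1 : Nat) : Int) + 1 := by push_cast; ring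
        rw [show aLoop ('.' :: rest) ((m : Int) + 1) ranges false none
              = aLoop rest (((m : Int) + 1) + 1) ranges true (some ((m : Int) + 1)) from by
            simp [aLoop]]
        rw [h1, aLoop_in_region rest (m + 1) ranges ((m : Int) + 1)]
        set k := (rest.takeWhile (· = '.')).length with hk
        have hkd : k + (rest.dropWhile (· = '.')).length = rest.length := by
          rw [hk, ← List.length_append, List.takeWhile_append_dropWhile]
        by_cases hd : rest.dropWhile (· = '.') = []
        · have htw : rest.takeWhile (· = '.') = rest := by
            have := rest.takeWhile_append_dropWhile (p := (· = '.'))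
            rw [hd, List.append_nil] at this; exact this
          rw [if_pos hd]
          rw [show altGo ('.' :: rest) m
                = ((m : Int) + 1, (m : Int) + 1 + k) :: altGo (rest.dropWhile (· = '.')) (m + 1 + k)
              from by simp [altGo, hk]]
          rw [hd]
          simp only [altGo, aFlush, List.length_cons]
          simp
          rw [hk, htw]
          ring
        · rw [if_neg hd]
          have h2 : ((m + 1 : Nat) : Int) + (k : Int) + 1 = ((m + 1 + k : Nat) : Int) + 1 := by
            push_cast; ring
          rw [h2]
          have hrec := aLoop_out_region (rest.dropWhile (· = '.')) (m + 1 + k)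
            (ranges ++ [((m : Int) + 1, ((m + 1 : Nat) : Int) + (k : Int))])
          have hlen : (m : Int) + (('.' :: rest).length : Int) =
              ((m + 1 + k : Nat) : Int) + ((rest.dropWhile (· = '.')).length : Int) := by
            push_cast [List.length_cons]; omega
          rw [hlen, hrec]
          rw [show altGo ('.' :: rest) m
                = ((m : Int) + 1, (m : Int) + 1 + k) :: altGo (rest.dropWhile (· = '.')) (m + 1 + k)
              from by simp [altGo, hk]]
          have e1 : ((m + 1 : Nat) : Int) + (k : Int) = (m : Int) + 1 + (k : Int) := by
            push_cast; ring
          rw [e1]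
          simp
      · have h1 : ((m : Int) + 1) + 1 = ((m + 1 : Nat) : Int) + 1 := by push_cast; ring
        rw [show aLoop (c :: rest) ((m : Int) + 1) ranges false none
              = aLoop rest (((m : Int) + 1) + 1) ranges false none from by simp [aLoop, hc]]
        rw [h1]
        have hlen : (m : Int) + ((c :: rest).length : Int) =
            ((m + 1 : Nat) : Int) + (rest.length : Int) := by push_cast [List.length_cons]; ring
        rw [hlen, aLoop_out_region rest (m + 1) ranges]
        simp [altGo, hc]
  termination_by l.length
  decreasing_by
  · exact Nat.lt_succ_of_le (rest.length_dropWhile_le _)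
  · simp

-- ===== VERDICT (by name: the statement is the Claim_ definition above) =====
theorem extract_unpaired_regions_spec : Claim_equal_extract_unpaired_regions := by
  intro s _
  show extract_unpaired_regions s = extract_unpaired_regions_alt s
  have := aLoop_out_region s.toList 0 []
  simp only [Nat.cast_zero, zero_add, List.nil_append] at this
  unfold extract_unpaired_regions extract_unpaired_regions_alt
  simpa [aFlush] using this
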